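-- pv_equiv track=rewrite | github.com/Tarrow9/BDO_HUD | HUD_Client/screen_scan.py | _pick_duo_lines
-- ===== SOURCE A (Python) =====
-- def _pick_duo_lines(filterd_lines, min_diff=110, max_diff=130):
--     def angle_difference(angle1, angle2):
--         diff = abs(angle1 - angle2)
--         return min(diff, 360 - diff)  # 양방향 차이 중 최소값
--
--     filtered_azimuths = []
--     for i in range(len(filterd_lines)):
--         for j in range(i + 1, len(filterd_lines)):
--             if min_diff <= angle_difference(filterd_lines[i], filterd_lines[j]) <= max_diff:
--                 filtered_azimuths.append(filterd_lines[i])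
--                 filtered_azimuths.append(filterd_lines[j])
--                 break
--     return filtered_azimuths
-- ===== SOURCE B (Python) =====
-- def _pick_duo_lines(filterd_lines, min_diff=110, max_diff=130):
--     # Single forward sweep: each arriving line closes every earlier still-unpaired
--     # line whose circular difference lies in the band; partners recorded in a dict,
--     # output assembled in one final pass over the original order.
--     def in_band(d):
--         return min_diff <= d <= 360 - min_diff and (d <= max_diff or 360 - max_diff <= d)
--
--     partner = {}
--     pending = []  # (index, value) of earlier lines not yet paired, in order
--     for j, y in enumerate(filterd_lines):
--         still = []
--         for i, x in pending:
--             if in_band(abs(x - y)):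
--                 partner[i] = y
--             else:
--                 still.append((i, x))
--         still.append((j, y))
--         pending = still
--     out = []
--     for i, x in enumerate(filterd_lines):
--         if i in partner:
--             out.append(x)
--             out.append(partner[i])
--     return out
-- ===== Notes on version B (the rewrite author's own statement) =====
-- stated objective: alternative
-- what changed: Instead of A's per-element forward scan of the suffix (nested index loops with break), B makes one forward sweep in which each arriving line closes every still-unpaired earlier line whose circular difference falls in the band, recording partners in a dict and shrinking the pending set; the output is assembled in a separate final pass over the original order.
import Mathlib
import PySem

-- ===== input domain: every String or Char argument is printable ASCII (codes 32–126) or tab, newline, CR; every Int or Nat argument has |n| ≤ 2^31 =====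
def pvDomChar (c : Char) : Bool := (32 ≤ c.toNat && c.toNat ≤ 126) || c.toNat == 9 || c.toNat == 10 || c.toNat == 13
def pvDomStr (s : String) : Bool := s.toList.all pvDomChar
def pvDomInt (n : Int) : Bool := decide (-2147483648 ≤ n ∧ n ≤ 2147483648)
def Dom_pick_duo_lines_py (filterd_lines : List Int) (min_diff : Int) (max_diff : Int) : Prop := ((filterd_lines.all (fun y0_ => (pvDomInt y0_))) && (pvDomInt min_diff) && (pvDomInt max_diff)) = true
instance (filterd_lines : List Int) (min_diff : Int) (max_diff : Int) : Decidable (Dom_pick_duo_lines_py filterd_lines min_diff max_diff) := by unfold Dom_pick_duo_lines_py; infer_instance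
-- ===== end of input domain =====

-- B replaces A's per-element forward scan of the suffix (nested loops with break) by a single
-- forward sweep in which each arriving line closes every still-unpaired earlier line whose
-- circular difference is in the band (partners kept in a dict, output assembled in a final pass).

-- ===== PORT A =====
-- helper angle_difference of A
def pvAngleDiff (a b : Int) : Int :=
  let diff := |a - b|
  min diff (360 - diff)

-- inner 'for j in range(i+1, len)' loop with its break (first match appends both and stops)
def pvInnerA (xs : List Int) (mn mx i : Int) (acc : List Int) : List Int → List Int
  | [] => acc
  | j :: js =>
    if mn ≤ pvAngleDiff (PySem.List.pyGetD xs i 0) (PySem.List.pyGetD xs j 0) ∧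
       pvAngleDiff (PySem.List.pyGetD xs i 0) (PySem.List.pyGetD xs j 0) ≤ mx then
      acc ++ [PySem.List.pyGetD xs i 0, PySem.List.pyGetD xs j 0]
    else pvInnerA xs mn mx i acc js

def pick_duo_lines_py (filterd_lines : List Int) (min_diff : Int) (max_diff : Int) : List Int :=
  (PySem.List.pyRange 0 (filterd_lines.length : Int) 1).foldl
    (fun acc i =>
      pvInnerA filterd_lines min_diff max_diff i acc
        (PySem.List.pyRange (i + 1) (filterd_lines.length : Int) 1))
    []

-- ===== PORT B =====
-- B's in_band predicate on d = |x - y|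
def pvInBand (mn mx d : Int) : Bool :=
  decide (mn ≤ d ∧ d ≤ 360 - mn ∧ (d ≤ mx ∨ 360 - mx ≤ d))

-- B's inner 'for i, x in pending' loop: arriving value y closes every matching pending line
-- (recording its partner in the dict) and keeps the rest in 'still'
def pvClose (mn mx y : Int) :
    List (Int × Int) → List (Int × Int) → PySem.Dict Int Int →
      List (Int × Int) × PySem.Dict Int Int
  | [], still, partner => (still, partner)
  | (i, x) :: ps, still, partner =>
    if pvInBand mn mx |x - y| then pvClose mn mx y ps still (partner.insert i y)
    else pvClose mn mx y ps (still ++ [(i, x)]) partner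

-- B's outer 'for j, y in enumerate(filterd_lines)' loop
def pvSweep (mn mx : Int) :
    List (Int × Int) → List (Int × Int) → PySem.Dict Int Int → PySem.Dict Int Int
  | [], _pending, partner => partner
  | (j, y) :: rest, pending, partner =>
    let sp := pvClose mn mx y pending [] partner
    pvSweep mn mx rest (sp.1 ++ [(j, y)]) sp.2

def pick_duo_lines_py_alt (filterd_lines : List Int) (min_diff : Int) (max_diff : Int) : List Int :=
  let partner := pvSweep min_diff max_diff (PySem.List.enumerate filterd_lines 0) [] PySem.Dict.empty
  -- final 'for i, x in enumerate: if i in partner: out += [x, partner[i]]'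
  (PySem.List.enumerate filterd_lines 0).foldl
    (fun acc p =>
      match partner.get? p.1 with
      | some y => acc ++ [p.2, y]
      | none => acc) []

-- ===== PRECONDITION & SPEC =====
def Spec_pick_duo_lines_py (filterd_lines : List Int) (min_diff : Int) (max_diff : Int) (out : List Int) : Prop := out = pick_duo_lines_py_alt filterd_lines min_diff max_diff
instance (filterd_lines : List Int) (min_diff : Int) (max_diff : Int) (out : List Int) : Decidable (Spec_pick_duo_lines_py filterd_lines min_diff max_diff out) := by unfold Spec_pick_duo_lines_py; infer_instance

-- ===== CLAIM (what is proved, stated in full; the proofs are below) =====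
def Claim_equal_pick_duo_lines_py : Prop := ∀ (filterd_lines : List Int) (min_diff : Int) (max_diff : Int), Dom_pick_duo_lines_py filterd_lines min_diff max_diff → Spec_pick_duo_lines_py filterd_lines min_diff max_diff (pick_duo_lines_py filterd_lines min_diff max_diff)

-- ===== LEMMAS AND PROOFS =====

-- A's pair test and B's band test agree
theorem pvCond_eq (mn mx x y : Int) :
    (mn ≤ pvAngleDiff x y ∧ pvAngleDiff x y ≤ mx) ↔ pvInBand mn mx (|x - y|) = true := by
  have h0 : 0 ≤ |x - y| := abs_nonneg _
  simp only [pvAngleDiff, pvInBand, decide_eq_true_eq]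
  omega

-- "first match" block shared by both characterizations
def pvPair (mn mx x : Int) (ys : List Int) : List Int :=
  match ys.find? (fun y => pvInBand mn mx (|x - y|)) with
  | some y => [x, y]
  | none => []

theorem pvInnerA_eq (xs : List Int) (mn mx i : Int) (acc : List Int) (js : List Int) :
    pvInnerA xs mn mx i acc js =
      acc ++ pvPair mn mx (PySem.List.pyGetD xs i 0)
        (js.map (fun j => PySem.List.pyGetD xs j 0)) := by
  induction js with
  | nil => simp [pvInnerA, pvPair]
  | cons j js ih =>
    simp only [pvInnerA, List.map_cons, pvPair, List.find?]
    by_cases h : mn ≤ pvAngleDiff (PySem.List.pyGetD xs i 0) (PySem.List.pyGetD xs j 0) ∧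
        pvAngleDiff (PySem.List.pyGetD xs i 0) (PySem.List.pyGetD xs j 0) ≤ mx
    · rw [if_pos h]
      have hb := (pvCond_eq mn mx (PySem.List.pyGetD xs i 0) (PySem.List.pyGetD xs j 0)).mp h
      simp [hb]
    · rw [if_neg h]
      have hb : pvInBand mn mx (|PySem.List.pyGetD xs i 0 - PySem.List.pyGetD xs j 0|) = false := by
        rcases hbb : pvInBand mn mx (|PySem.List.pyGetD xs i 0 - PySem.List.pyGetD xs j 0|) with _ | _
        · rfl
        · exact absurd ((pvCond_eq mn mx _ _).mpr hbb) h
      rw [ih, hb, pvPair]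

-- the block contributed by index i of A's outer loop
def pvF (xs : List Int) (mn mx i : Int) : List Int :=
  pvPair mn mx (PySem.List.pyGetD xs i 0)
    ((PySem.List.pyRange (i + 1) (xs.length : Int) 1).map (fun j => PySem.List.pyGetD xs j 0))

-- A's outer foldl accumulates by appending pvF blocks
theorem pvFold_eq (xs : List Int) (mn mx : Int) (l : List Int) (acc : List Int) :
    l.foldl (fun acc i =>
        pvInnerA xs mn mx i acc (PySem.List.pyRange (i + 1) (xs.length : Int) 1)) acc =
      acc ++ l.flatMap (fun i => pvF xs mn mx i) := by
  induction l generalizing acc with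
  | nil => simp
  | cons i l ih =>
    rw [List.foldl_cons, pvInnerA_eq, ih, List.flatMap_cons, List.append_assoc]
    rfl

-- for 0 ≤ i the block is a first match over the plain suffix
theorem pvF_drop (xs : List Int) (mn mx i : Int) (h : 0 ≤ i) :
    pvF xs mn mx i = pvPair mn mx (PySem.List.pyGetD xs i 0) (xs.drop (i + 1).toNat) := by
  rw [pvF, PySem.List.map_pyGetD_pyRange' xs 0 (a := i + 1) (by omega)]

-- ---- characterization of pvClose ----

theorem pvClose_fst (mn mx y : Int) (ps : List (Int × Int)) (still : List (Int × Int))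
    (d : PySem.Dict Int Int) :
    (pvClose mn mx y ps still d).1 =
      still ++ ps.filter (fun p => !pvInBand mn mx (|p.2 - y|)) := by
  induction ps generalizing still d with
  | nil => simp [pvClose]
  | cons p ps ih =>
    obtain ⟨i, x⟩ := p
    simp only [pvClose, List.filter_cons]
    by_cases hb : pvInBand mn mx (|x - y|) = true
    · simp [hb, ih]
    · simp only [Bool.not_eq_true] at hb
      simp [hb, ih]

theorem pvClose_get_notmem (mn mx y : Int) (ps still : List (Int × Int))
    (d : PySem.Dict Int Int) (i : Int) (h : i ∉ ps.map Prod.fst) :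
    ((pvClose mn mx y ps still d).2).get? i = d.get? i := by
  induction ps generalizing still d with
  | nil => simp [pvClose]
  | cons p ps ih =>
    obtain ⟨k, x⟩ := p
    simp only [List.map_cons, List.mem_cons, not_or] at h
    simp only [pvClose]
    by_cases hb : pvInBand mn mx (|x - y|) = true
    · rw [if_pos hb, ih _ _ h.2, PySem.Dict.get?_insert_of_ne _ _ h.1]
    · rw [if_neg hb, ih _ _ h.2]

-- with distinct firsts, a key determines its value
theorem pvFstNodup_eq (ps : List (Int × Int)) (hnd : (ps.map Prod.fst).Nodup)
    (i x x' : Int) (h1 : (i, x) ∈ ps) (h2 : (i, x') ∈ ps) : x = x' := by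
  induction ps with
  | nil => cases h1
  | cons p ps ih =>
    simp only [List.map_cons, List.nodup_cons] at hnd
    rcases List.mem_cons.mp h1 with h1 | h1 <;> rcases List.mem_cons.mp h2 with h2 | h2
    · rw [← h1] at h2; exact (Prod.mk.injEq _ _ _ _ ▸ h2).2.symm
    · exfalso; exact hnd.1 (h1 ▸ (List.mem_map.mpr ⟨(i, x'), h2, rfl⟩))
    · exfalso; exact hnd.1 (h2 ▸ (List.mem_map.mpr ⟨(i, x), h1, rfl⟩))
    · exact ih hnd.2 h1 h2

theorem pvClose_get_mem (mn mx y : Int) (ps still : List (Int × Int))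
    (d : PySem.Dict Int Int) (i x : Int)
    (hnd : (ps.map Prod.fst).Nodup) (hm : (i, x) ∈ ps) :
    ((pvClose mn mx y ps still d).2).get? i =
      if pvInBand mn mx (|x - y|) then some y else d.get? i := by
  induction ps generalizing still d with
  | nil => cases hm
  | cons p ps ih =>
    obtain ⟨k, z⟩ := p
    simp only [List.map_cons, List.nodup_cons] at hnd
    rcases List.mem_cons.mp hm with hm | hm
    · obtain ⟨hik, hxz⟩ := Prod.mk.injEq _ _ _ _ ▸ hm
      subst hik; subst hxz
      simp only [pvClose]
      by_cases hb : pvInBand mn mx (|x - y|) = true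
      · rw [if_pos hb, if_pos hb, pvClose_get_notmem _ _ _ _ _ _ _ hnd.1,
          PySem.Dict.get?_insert_self]
      · rw [if_neg hb, if_neg hb, pvClose_get_notmem _ _ _ _ _ _ _ hnd.1]
    · have hik : i ≠ k := fun h => hnd.1 (h ▸ (List.mem_map.mpr ⟨(i, x), hm, rfl⟩))
      simp only [pvClose]
      by_cases hb : pvInBand mn mx (|z - y|) = true
      · rw [if_pos hb, ih _ _ hnd.2 hm, PySem.Dict.get?_insert_of_ne _ _ hik]
      · rw [if_neg hb, ih _ _ hnd.2 hm]

-- ---- bookkeeping for the sweep ----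

theorem pvStill_fst_sublist (mn mx y : Int) (ps : List (Int × Int)) (d : PySem.Dict Int Int) :
    ((pvClose mn mx y ps [] d).1.map Prod.fst).Sublist (ps.map Prod.fst) := by
  rw [pvClose_fst, List.nil_append]
  exact List.Sublist.map Prod.fst List.filter_sublist

theorem pvStep_nodup (mn mx y j : Int) (pending : List (Int × Int)) (E : List Int)
    (d : PySem.Dict Int Int)
    (hnd : (pending.map Prod.fst ++ (j :: E)).Nodup) :
    (((pvClose mn mx y pending [] d).1 ++ [(j, y)]).map Prod.fst ++ E).Nodup := by
  rw [List.nodup_append] at hnd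
  obtain ⟨hP, hjE, hdisj⟩ := hnd
  have hS := pvStill_fst_sublist mn mx y pending d
  rw [List.map_append, List.nodup_append, List.nodup_append]
  refine ⟨⟨hS.nodup hP, by simp, ?_⟩, (List.nodup_cons.mp hjE).2, ?_⟩
  · intro a ha b hb
    simp only [List.map_cons, List.map_nil, List.mem_cons, List.not_mem_nil, or_false] at hb
    exact fun hab => hdisj a (hS.subset ha) j List.mem_cons_self (hab.trans hb)
  · intro a ha b hb
    rcases List.mem_append.mp ha with ha | ha
    · exact hdisj a (hS.subset ha) b (List.mem_cons_of_mem _ hb)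
    · simp only [List.map_cons, List.map_nil, List.mem_cons, List.not_mem_nil, or_false] at ha
      exact fun h => (List.nodup_cons.mp hjE).1 (by rw [← h, ha] at hb; exact hb)

theorem pvSweep_get_notmem (mn mx : Int) (es : List (Int × Int)) :
    ∀ (pending : List (Int × Int)) (d : PySem.Dict Int Int) (i : Int),
      i ∉ pending.map Prod.fst → i ∉ es.map Prod.fst →
      (pvSweep mn mx es pending d).get? i = d.get? i := by
  induction es with
  | nil => intro pending d i _ _; simp [pvSweep]
  | cons p es ih =>
    intro pending d i hp he
    obtain ⟨j, y⟩ := p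
    simp only [List.map_cons, List.mem_cons, not_or] at he
    simp only [pvSweep]
    rw [ih _ _ i ?_ he.2, pvClose_get_notmem _ _ _ _ _ _ _ hp]
    · intro h
      rw [List.map_append] at h
      rcases List.mem_append.mp h with h | h
      · exact hp ((pvStill_fst_sublist mn mx y pending d).subset h)
      · simp only [List.map_cons, List.map_nil, List.mem_cons, List.not_mem_nil, or_false] at h
        exact he.1 h

theorem pvSweep_get_mem (mn mx : Int) (es : List (Int × Int)) :
    ∀ (pending : List (Int × Int)) (d : PySem.Dict Int Int) (i x : Int),
      (pending.map Prod.fst ++ es.map Prod.fst).Nodup → (i, x) ∈ pending →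
      (pvSweep mn mx es pending d).get? i =
        match (es.map Prod.snd).find? (fun y => pvInBand mn mx (|x - y|)) with
        | some y => some y
        | none => d.get? i := by
  induction es with
  | nil => intro pending d i x _ _; simp [pvSweep]
  | cons p es ih =>
    intro pending d i x hnd hm
    obtain ⟨j, y⟩ := p
    have hndP : (pending.map Prod.fst).Nodup := ((List.nodup_append.mp hnd).1)
    have hiP : i ∈ pending.map Prod.fst := List.mem_map.mpr ⟨(i, x), hm, rfl⟩
    have hdisj := (List.nodup_append.mp hnd).2.2
    have hij : i ≠ j := hdisj i hiP j (by simp)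
    have hiE : i ∉ es.map Prod.fst := fun h => hdisj i hiP i (by simp [h]) rfl
    simp only [pvSweep, List.map_cons, List.find?]
    by_cases hb : pvInBand mn mx (|x - y|) = true
    · rw [hb]
      have hiS : i ∉ ((pvClose mn mx y pending [] d).1 ++ [(j, y)]).map Prod.fst := by
        rw [List.map_append]
        intro h
        rcases List.mem_append.mp h with h | h
        · rw [pvClose_fst, List.nil_append] at h
          obtain ⟨⟨i', x'⟩, hmem, hfst⟩ := List.mem_map.mp h
          obtain ⟨hmem', hkeep⟩ := List.mem_filter.mp hmem
          have hx : x = x' := pvFstNodup_eq pending hndP i x x' hm (by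
            have hii : i' = i := hfst
            rwa [hii] at hmem')
          rw [← hx, hb] at hkeep
          exact absurd hkeep (by simp)
        · simp only [List.map_cons, List.map_nil, List.mem_cons, List.not_mem_nil, or_false] at h
          exact hij h
      rw [pvSweep_get_notmem mn mx es _ _ i hiS hiE,
        pvClose_get_mem mn mx y pending [] d i x hndP hm, if_pos hb]
    · rw [Bool.not_eq_true] at hb
      rw [hb]
      have hmS : (i, x) ∈ (pvClose mn mx y pending [] d).1 ++ [(j, y)] := by
        rw [pvClose_fst, List.nil_append]
        exact List.mem_append.mpr (Or.inl (List.mem_filter.mpr ⟨hm, by rw [hb]; rfl⟩))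
      rw [ih _ _ i x (pvStep_nodup mn mx y j pending (es.map Prod.fst) d hnd) hmS,
        pvClose_get_mem mn mx y pending [] d i x hndP hm, if_neg (by rw [hb]; simp)]

theorem pvSweep_get_at (mn mx : Int) (pre : List (Int × Int)) :
    ∀ (j x : Int) (post pending : List (Int × Int)) (d : PySem.Dict Int Int),
      (pending.map Prod.fst ++ (pre ++ (j, x) :: post).map Prod.fst).Nodup →
      (pvSweep mn mx (pre ++ (j, x) :: post) pending d).get? j =
        match (post.map Prod.snd).find? (fun y => pvInBand mn mx (|x - y|)) with
        | some y => some y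
        | none => d.get? j := by
  induction pre with
  | nil =>
    intro j x post pending d hnd
    have hjP : j ∉ pending.map Prod.fst := fun h =>
      (List.nodup_append.mp hnd).2.2 j h j (by simp) rfl
    simp only [List.nil_append] at hnd ⊢
    simp only [pvSweep]
    rw [pvSweep_get_mem mn mx post _ _ j x
        (pvStep_nodup mn mx x j pending (post.map Prod.fst) d (by simpa using hnd))
        (List.mem_append.mpr (Or.inr List.mem_cons_self)),
      pvClose_get_notmem _ _ _ _ _ _ _ hjP]
  | cons p pre ih =>
    intro j x post pending d hnd
    obtain ⟨k, z⟩ := p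
    have hjP : j ∉ pending.map Prod.fst := fun h =>
      (List.nodup_append.mp hnd).2.2 j h j (by simp) rfl
    simp only [List.cons_append, pvSweep]
    rw [ih j x post _ _ ?_, pvClose_get_notmem _ _ _ _ _ _ _ hjP]
    exact pvStep_nodup mn mx z k pending ((pre ++ (j, x) :: post).map Prod.fst) d
      (by simpa using hnd)

-- final dict value at index j is the first match over the plain suffix
theorem pvFinal_get (xs : List Int) (mn mx j : Int) (h0 : 0 ≤ j) (hj : j < (xs.length : Int)) :
    (pvSweep mn mx (PySem.List.enumerate xs 0) [] PySem.Dict.empty).get? j =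
      (xs.drop (j + 1).toNat).find?
        (fun y => pvInBand mn mx (|PySem.List.pyGetD xs j 0 - y|)) := by
  have hen : PySem.List.enumerate xs 0 =
      (PySem.List.pyRange 0 (xs.length : Int) 1).map (fun i => (i, PySem.List.pyGetD xs i 0)) :=
    PySem.List.enumerate_eq_map_pyRange xs 0
  have hsplit : PySem.List.pyRange 0 (xs.length : Int) 1 =
      PySem.List.pyRange 0 j 1 ++ PySem.List.pyRange j (xs.length : Int) 1 :=
    PySem.List.pyRange_one_append 0 j (xs.length : Int) h0 (le_of_lt hj)
  have hcons : PySem.List.pyRange j (xs.length : Int) 1 =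
      j :: PySem.List.pyRange (j + 1) (xs.length : Int) 1 :=
    PySem.List.pyRange_one_cons hj
  have hes : PySem.List.enumerate xs 0 =
      (PySem.List.pyRange 0 j 1).map (fun i => (i, PySem.List.pyGetD xs i 0)) ++
        (j, PySem.List.pyGetD xs j 0) ::
          (PySem.List.pyRange (j + 1) (xs.length : Int) 1).map
            (fun i => (i, PySem.List.pyGetD xs i 0)) := by
    rw [hen, hsplit, hcons, List.map_append, List.map_cons]
  have hnd : (([] : List (Int × Int)).map Prod.fst ++
      (PySem.List.enumerate xs 0).map Prod.fst).Nodup := by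
    rw [hen, List.map_nil, List.nil_append, List.map_map]
    have : (Prod.fst ∘ fun i => (i, PySem.List.pyGetD xs i 0)) = id := rfl
    rw [this, List.map_id]
    exact PySem.List.nodup_pyRange_one 0 (xs.length : Int)
  rw [hes] at hnd ⊢
  rw [pvSweep_get_at mn mx _ j (PySem.List.pyGetD xs j 0) _ [] PySem.Dict.empty hnd]
  rw [List.map_map]
  have hsnd : (Prod.snd ∘ fun i => (i, PySem.List.pyGetD xs i 0)) =
      (fun i => PySem.List.pyGetD xs i 0) := rfl
  rw [hsnd, PySem.List.map_pyGetD_pyRange' xs 0 (a := j + 1) (by omega)]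
  cases hfind : (xs.drop (j + 1).toNat).find?
      (fun y => pvInBand mn mx (|PySem.List.pyGetD xs j 0 - y|)) with
  | none => simp [PySem.Dict.get?_empty]
  | some y => simp

-- ===== VERDICT (by name: the statement is the Claim_ definition above) =====
theorem pick_duo_lines_py_spec : Claim_equal_pick_duo_lines_py := by
  intro xs mn mx _
  show pick_duo_lines_py xs mn mx = pick_duo_lines_py_alt xs mn mx
  rw [pick_duo_lines_py, pvFold_eq, List.nil_append]
  rw [pick_duo_lines_py_alt]
  have hfun : (fun (acc : List Int) (p : Int × Int) =>
      match (pvSweep mn mx (PySem.List.enumerate xs 0) [] PySem.Dict.empty).get? p.1 with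
      | some y => acc ++ [p.2, y]
      | none => acc) =
      (fun acc p => acc ++
        match (pvSweep mn mx (PySem.List.enumerate xs 0) [] PySem.Dict.empty).get? p.1 with
        | some y => [p.2, y]
        | none => []) := by
    funext acc p
    cases (pvSweep mn mx (PySem.List.enumerate xs 0) [] PySem.Dict.empty).get? p.1 <;> simp
  rw [hfun, PySem.List.foldl_append_eq_flatMap, List.nil_append,
    PySem.List.enumerate_eq_map_pyRange xs 0, List.flatMap_map]
  refine (List.flatMap_congr ?_).symm
  intro j hj
  obtain ⟨h0, hjlt⟩ := (PySem.List.mem_pyRange_one).mp hj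
  show (match (pvSweep mn mx
        ((PySem.List.pyRange 0 (PySem.List.len xs)).map (fun i => (i, PySem.List.pyGetD xs i 0)))
        [] PySem.Dict.empty).get? j with
      | some y => [PySem.List.pyGetD xs j 0, y]
      | none => []) = pvF xs mn mx j
  rw [← PySem.List.enumerate_eq_map_pyRange xs 0, pvFinal_get xs mn mx j h0 hjlt,
    pvF_drop xs mn mx j h0, pvPair]
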